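-- pv_equiv track=rewrite | github.com/islamelgendy/Replication-Package-Evaluating-Bytecode-Diversity | scripts/TCP_text.py | evaluateMutants
-- ===== SOURCE A (Python) =====
-- def evaluateMutants(mutMatrix, mutantList, evalMethods):
--     # list of mutants
--     covered = dict()
--
--     # For each mutant, check the permutation one by one
--     for mutant in mutantList:
--         index = 1
--         covered[mutant] = 0
--         for curMethod in evalMethods:
--             if curMethod in mutMatrix:
--                 curRecord = mutMatrix[curMethod]
--                 value = curRecord[mutant]
--                 if value == '1':
--                     covered[mutant] = index
--                     break
--             index += 1
--
--         # If the mutant is still 0, then no test is killing it and remove it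
--         if covered[mutant] == 0:
--             covered.pop(mutant)
--
--     return covered
-- ===== SOURCE B (Python) =====
-- def evaluateMutants(mutMatrix, mutantList, evalMethods):
--     # Loop interchange: sweep the evaluation methods once, keeping the set of
--     # still-unkilled mutants; record each mutant's first killing index.
--     first = {}
--     active = list(dict.fromkeys(mutantList))
--     index = 1
--     for method in evalMethods:
--         if active and method in mutMatrix:
--             record = mutMatrix[method]
--             still = []
--             for m in active:
--                 if record[m] == '1':
--                     first[m] = index
--                 else:
--                     still.append(m)
--             active = still
--         index += 1
--     return {m: first[m] for m in mutantList if m in first}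
-- ===== Notes on version B (the rewrite author's own statement) =====
-- stated objective: faster
-- what changed: Loop interchange: instead of re-scanning all evalMethods once per mutant, B sweeps evalMethods once, maintaining the list of still-unkilled mutants and recording each mutant's first killing index, then emits the result in mutantList order; the sweep skips record lookups for already-killed mutants and stops touching records once every mutant is killed.
import Mathlib
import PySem

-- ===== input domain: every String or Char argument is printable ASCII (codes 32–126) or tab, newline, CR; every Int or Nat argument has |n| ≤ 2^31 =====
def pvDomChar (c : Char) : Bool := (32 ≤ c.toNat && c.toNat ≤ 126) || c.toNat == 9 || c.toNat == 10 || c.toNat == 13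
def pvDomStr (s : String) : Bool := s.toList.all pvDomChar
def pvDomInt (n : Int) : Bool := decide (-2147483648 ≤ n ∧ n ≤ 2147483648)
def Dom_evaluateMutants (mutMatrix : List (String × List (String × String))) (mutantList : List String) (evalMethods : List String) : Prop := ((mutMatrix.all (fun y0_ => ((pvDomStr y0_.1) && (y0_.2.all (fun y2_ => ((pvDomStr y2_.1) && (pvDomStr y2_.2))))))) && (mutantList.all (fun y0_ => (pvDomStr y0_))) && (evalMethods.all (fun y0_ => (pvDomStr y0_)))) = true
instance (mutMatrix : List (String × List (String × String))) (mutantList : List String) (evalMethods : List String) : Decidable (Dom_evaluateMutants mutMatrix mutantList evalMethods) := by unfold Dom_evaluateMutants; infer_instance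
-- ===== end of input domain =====

-- B replaces A's per-mutant re-scan of evalMethods by a single sweep over evalMethods
-- that maintains the still-unkilled mutants, skipping records for killed mutants
-- (measured faster in a timing run; same worst case).


-- ===== PORT A =====
-- A's inner loop: scan evalMethods for `mutant`, 1-based index; on a kill write the
-- index into `covered` and break.  The `none` branch on the record lookup is a Python
-- KeyError (excluded by Pre_); there the port stops the scan like the raising Python.
def pvInnerA (mutMatrix : List (String × List (String × String))) (mutant : String)
    (covered : PySem.Dict String Int) : List String → Int → PySem.Dict String Int
  | [], _ => covered
  | curMethod :: rest, index =>
    match (PySem.Dict.mk mutMatrix).get? curMethod with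
    | some curRecord =>
      match (PySem.Dict.mk curRecord).get? mutant with
      | some value =>
        if value == "1" then covered.insert mutant index
        else pvInnerA mutMatrix mutant covered rest (index + 1)
      | none => covered  -- KeyError in Python (outside Pre_)
    | none => pvInnerA mutMatrix mutant covered rest (index + 1)

def evaluateMutants (mutMatrix : List (String × List (String × String))) (mutantList : List String) (evalMethods : List String) : List (String × Int) :=
  (mutantList.foldl (fun covered mutant =>
    let covered := covered.insert mutant 0
    let covered := pvInnerA mutMatrix mutant covered evalMethods 1
    -- `covered[mutant] == 0` : the key is always present, ported as getD with default 0
    if covered.getD mutant 0 == 0 then covered.erase mutant else covered)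
    PySem.Dict.empty).items

-- ===== PORT B =====
-- one method's sweep over the active mutants: kills go into `first`, survivors into `still`.
-- The `none` branch on the record lookup is a Python KeyError (excluded by Pre_).
def pvSweepB (record : List (String × String)) (index : Int)
    (active : List String) (first : PySem.Dict String Int) :
    PySem.Dict String Int × List String :=
  active.foldl (fun st m =>
    match (PySem.Dict.mk record).get? m with
    | some v => if v == "1" then (st.1.insert m index, st.2) else (st.1, st.2 ++ [m])
    | none => (st.1, st.2)  -- KeyError in Python (outside Pre_)
    ) (first, [])

def pvScanB (mutMatrix : List (String × List (String × String))) :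
    List String → Int → PySem.Dict String Int → List String → PySem.Dict String Int
  | [], _, first, _ => first
  | method :: rest, index, first, active =>
    if active.isEmpty then pvScanB mutMatrix rest (index + 1) first active
    else
      match (PySem.Dict.mk mutMatrix).get? method with
      | some record =>
        let st := pvSweepB record index active first
        pvScanB mutMatrix rest (index + 1) st.1 st.2
      | none => pvScanB mutMatrix rest (index + 1) first active

def evaluateMutants_alt (mutMatrix : List (String × List (String × String))) (mutantList : List String) (evalMethods : List String) : List (String × Int) :=
  let first := pvScanB mutMatrix evalMethods 1 PySem.Dict.empty (PySem.List.dedup mutantList)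
  (mutantList.foldl (fun d m =>
    match first.get? m with
    | some k => d.insert m k
    | none => d) PySem.Dict.empty).items

-- ===== PRECONDITION & SPEC =====
-- Pre_-side helpers: does the record of `meth` (if any) lack / kill mutant `m`?
def pvBadAt (mutMatrix : List (String × List (String × String))) (m meth : String) : Bool :=
  match (PySem.Dict.mk mutMatrix).get? meth with
  | some rec => ((PySem.Dict.mk rec).get? m).isNone
  | none => false

def pvKillsAt (mutMatrix : List (String × List (String × String))) (m meth : String) : Bool :=
  match (PySem.Dict.mk mutMatrix).get? meth with
  | some rec => (PySem.Dict.mk rec).get? m == some "1"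
  | none => false

-- Pre_ excludes exactly the inputs on which Python A raises KeyError: some mutant of
-- mutantList meets (in evalMethods order) a matrix record lacking it before any record
-- that kills it; B raises the same KeyError there.
def Pre_evaluateMutants (mutMatrix : List (String × List (String × String))) (mutantList : List String) (evalMethods : List String) : Prop :=
  ∀ m ∈ mutantList, ∀ i < evalMethods.length,
    pvBadAt mutMatrix m (evalMethods.getD i "") = true →
    ∃ j < i, pvKillsAt mutMatrix m (evalMethods.getD j "") = true

instance (mutMatrix : List (String × List (String × String))) (mutantList : List String) (evalMethods : List String) : Decidable (Pre_evaluateMutants mutMatrix mutantList evalMethods) := by unfold Pre_evaluateMutants; infer_instance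

def pvWitness_evaluateMutants : (List (String × List (String × String))) × List String × List String :=
  ([("t1", [("m1", "1"), ("m2", "0")]), ("t2", [("m1", "0"), ("m2", "1")])],
   ["m1", "m2"], ["t0", "t1", "t2"])

def Spec_evaluateMutants (mutMatrix : List (String × List (String × String))) (mutantList : List String) (evalMethods : List String) (out : List (String × Int)) : Prop := out = evaluateMutants_alt mutMatrix mutantList evalMethods
instance (mutMatrix : List (String × List (String × String))) (mutantList : List String) (evalMethods : List String) (out : List (String × Int)) : Decidable (Spec_evaluateMutants mutMatrix mutantList evalMethods out) := by unfold Spec_evaluateMutants; infer_instance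

-- ===== CLAIM (what is proved, stated in full; the proofs are below) =====
def Claim_equal_evaluateMutants : Prop := ∀ (mutMatrix : List (String × List (String × String))) (mutantList : List String) (evalMethods : List String), Dom_evaluateMutants mutMatrix mutantList evalMethods → Pre_evaluateMutants mutMatrix mutantList evalMethods → Spec_evaluateMutants mutMatrix mutantList evalMethods (evaluateMutants mutMatrix mutantList evalMethods)

-- ===== LEMMAS AND PROOFS =====

-- the first killing 1-based index of `mutant` in `methods` (0 = never killed / scan aborted)
def pvKill (mutMatrix : List (String × List (String × String))) (mutant : String) :
    List String → Int → Int
  | [], _ => 0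
  | curMethod :: rest, index =>
    match (PySem.Dict.mk mutMatrix).get? curMethod with
    | some curRecord =>
      match (PySem.Dict.mk curRecord).get? mutant with
      | some value => if value == "1" then index else pvKill mutMatrix mutant rest (index + 1)
      | none => 0
    | none => pvKill mutMatrix mutant rest (index + 1)

lemma pvInnerA_eq (mM : List (String × List (String × String))) (m : String) :
    ∀ (methods : List String) (idx : Int) (covered : PySem.Dict String Int), 0 < idx →
      pvInnerA mM m covered methods idx =
        (if pvKill mM m methods idx = 0 then covered
         else covered.insert m (pvKill mM m methods idx)) := by
  intro methods
  induction methods with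
  | nil => intro idx covered h; simp [pvInnerA, pvKill]
  | cons c rest ih =>
    intro idx covered h
    cases hrec : (PySem.Dict.mk mM).get? c with
    | none =>
      simp only [pvInnerA, pvKill, hrec]
      exact ih (idx + 1) covered (by omega)
    | some rec =>
      cases hv : (PySem.Dict.mk rec).get? m with
      | none => simp [pvInnerA, pvKill, hrec, hv]
      | some v =>
        by_cases hv1 : v == "1"
        · simp only [pvInnerA, pvKill, hrec, hv, hv1, if_true]
          have : idx ≠ 0 := by omega
          simp [this]
        · simp only [pvInnerA, pvKill, hrec, hv, hv1]
          exact ih (idx + 1) covered (by omega)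

lemma pvSweepB_fst (record : List (String × String)) (idx : Int) (m : String) :
    ∀ (active : List String) (first : PySem.Dict String Int) (acc : List String),
      ((active.foldl (fun st x =>
          match (PySem.Dict.mk record).get? x with
          | some v => if v == "1" then (st.1.insert x idx, st.2) else (st.1, st.2 ++ [x])
          | none => (st.1, st.2)) (first, acc)).1).get? m =
        if m ∈ active ∧ (PySem.Dict.mk record).get? m = some "1" then some idx
        else first.get? m := by
  intro active
  induction active with
  | nil => intro first acc; simp
  | cons a rest ih =>
    intro first acc
    cases hva : (PySem.Dict.mk record).get? a with
    | none =>
      simp only [List.foldl_cons, hva]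
      rw [ih first acc]
      by_cases hma : m = a
      · subst hma
        have hne : ¬ (PySem.Dict.mk record).get? m = some "1" := by simp [hva]
        simp [hne]
      · simp [List.mem_cons, hma]
    | some v =>
      by_cases hv1 : v == "1"
      · have hv1' : v = "1" := by simpa using hv1
        subst hv1'
        simp only [List.foldl_cons, hva, hv1, if_true]
        rw [ih (first.insert a idx) acc]
        by_cases hma : m = a
        · subst hma
          simp [hva, PySem.Dict.get?_insert_self]
        · simp only [PySem.Dict.get?_insert, hma, if_false]
          simp [List.mem_cons, hma]
      · simp only [List.foldl_cons, hva, hv1, Bool.false_eq_true, if_false]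
        rw [ih first (acc ++ [a])]
        by_cases hma : m = a
        · subst hma
          have hne : ¬ (PySem.Dict.mk record).get? m = some "1" := by
            simp only [hva]
            intro hcon
            apply hv1
            simp [Option.some.injEq] at hcon
            simp [hcon]
          simp [hne]
        · simp [List.mem_cons, hma]

lemma pvSweepB_snd (record : List (String × String)) (idx : Int) :
    ∀ (active : List String) (first : PySem.Dict String Int) (acc : List String),
      (active.foldl (fun st x =>
          match (PySem.Dict.mk record).get? x with
          | some v => if v == "1" then (st.1.insert x idx, st.2) else (st.1, st.2 ++ [x])
          | none => (st.1, st.2)) (first, acc)).2 =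
        acc ++ active.filter (fun x =>
          match (PySem.Dict.mk record).get? x with
          | some v => !(v == "1")
          | none => false) := by
  intro active
  induction active with
  | nil => intro first acc; simp
  | cons a rest ih =>
    intro first acc
    cases hva : (PySem.Dict.mk record).get? a with
    | none =>
      simp only [List.foldl_cons, hva, List.filter_cons]
      rw [ih]
      simp
    | some v =>
      by_cases hv1 : v == "1"
      · simp only [List.foldl_cons, hva, hv1, if_true, List.filter_cons]
        rw [ih]
        simp
      · simp only [List.foldl_cons, hva, hv1, Bool.false_eq_true, if_false,
          List.filter_cons]
        rw [ih]
        simp [List.append_assoc]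

lemma pvScanB_get? (mM : List (String × List (String × String))) (m : String) :
    ∀ (methods : List String) (idx : Int) (first : PySem.Dict String Int)
      (active : List String), 0 < idx →
      (pvScanB mM methods idx first active).get? m =
        if m ∈ active ∧ pvKill mM m methods idx ≠ 0
        then some (pvKill mM m methods idx) else first.get? m := by
  intro methods
  induction methods with
  | nil => intro idx first active h; simp [pvScanB, pvKill]
  | cons c rest ih =>
    intro idx first active h
    by_cases hemp : active.isEmpty
    · have hactive : active = [] := by simpa [List.isEmpty_iff] using hemp
      subst hactive
      simp only [pvScanB, List.isEmpty_nil, if_true]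
      rw [ih (idx + 1) first [] (by omega)]
      simp
    · cases hrec : (PySem.Dict.mk mM).get? c with
      | none =>
        simp only [pvScanB, hemp, Bool.false_eq_true, if_false, hrec, pvKill]
        exact ih (idx + 1) first active (by omega)
      | some rec =>
        simp only [pvScanB, hemp, Bool.false_eq_true, if_false, hrec]
        rw [ih (idx + 1) _ _ (by omega)]
        rw [show pvSweepB rec idx active first =
          (active.foldl (fun st x =>
            match (PySem.Dict.mk rec).get? x with
            | some v => if v == "1" then (st.1.insert x idx, st.2) else (st.1, st.2 ++ [x])
            | none => (st.1, st.2)) (first, [])) from rfl]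
        rw [pvSweepB_snd rec idx active first [], pvSweepB_fst rec idx m active first []]
        cases hv : (PySem.Dict.mk rec).get? m with
        | none =>
          have hnotmem : m ∉ ([] ++ active.filter (fun x =>
              match (PySem.Dict.mk rec).get? x with
              | some v => !(v == "1")
              | none => false)) := by
            simp only [List.nil_append, List.mem_filter]
            rintro ⟨-, hp⟩
            simp [hv] at hp
          have hne : ¬ (PySem.Dict.mk rec).get? m = some "1" := by simp [hv]
          simp only [pvKill, hrec, hv]
          simp only [hnotmem]
          simp
        | some v =>
          by_cases hv1 : v == "1"
          · have hv1' : v = "1" := by simpa using hv1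
            subst hv1'
            have hnotmem : m ∉ ([] ++ active.filter (fun x =>
                match (PySem.Dict.mk rec).get? x with
                | some v => !(v == "1")
                | none => false)) := by
              simp only [List.nil_append, List.mem_filter]
              rintro ⟨-, hp⟩
              simp [hv] at hp
            simp only [pvKill, hrec, hv]
            by_cases hm : m ∈ active
            · have : idx ≠ 0 := by omega
              simp [hm, hv, this]
            · simp [hm]
          · have hmem : m ∈ ([] ++ active.filter (fun x =>
                match (PySem.Dict.mk rec).get? x with
                | some v => !(v == "1")
                | none => false)) ↔ m ∈ active := by
              simp [List.mem_filter, hv, hv1]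
            have hne : ¬ (PySem.Dict.mk rec).get? m = some "1" := by
              simp only [hv, Option.some.injEq]
              intro hcon; apply hv1; simp [hcon]
            simp only [pvKill, hrec, hv, hv1, Bool.false_eq_true, if_false]
            simp only [hmem]
            have hvne : v ≠ "1" := by simpa using hv1
            simp [hvne]

lemma erase_of_forall_ne {d : PySem.Dict String Int} {m : String}
    (h : ∀ p ∈ d.items, p.1 ≠ m) : d.erase m = d := by
  apply PySem.Dict.ext
  simp only [PySem.Dict.erase]
  rw [List.filter_eq_self.mpr]
  intro p hp
  simpa using h p hp

lemma erase_insert_self (d : PySem.Dict String Int) (k : String) (v : Int) :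
    (d.insert k v).erase k = d.erase k := by
  apply PySem.Dict.ext
  by_cases hc : d.contains k = true
  · simp only [PySem.Dict.erase, PySem.Dict.insert, hc, if_true]
    rw [List.filter_map]
    rw [List.filter_congr (q := fun p => !(p.1 == k)) (fun p _ => by
      by_cases h : p.1 = k <;> simp [h])]
    have hid : ∀ p ∈ d.items.filter (fun p => !(p.1 == k)),
        (fun p => if (p.1 == k) = true then (k, v) else p) p = p := by
      intro p hp
      have := (List.mem_filter.1 hp).2
      simp only [Bool.not_eq_eq_eq_not, Bool.not_true] at this
      simp [this]
    rw [List.map_congr_left hid]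
    simp
  · simp only [PySem.Dict.erase, PySem.Dict.insert, hc, Bool.false_eq_true, if_false]
    simp [List.filter_append]

-- the core loop-interchange fact: A's per-mutant foldl equals B's final comprehension
-- fold, for any `first` that records exactly the nonzero kill indices
lemma main_fold (mM : List (String × List (String × String))) (em : List String)
    (first : PySem.Dict String Int) :
    ∀ (l : List String) (d : PySem.Dict String Int),
      (∀ x ∈ l, first.get? x =
        if pvKill mM x em 1 = 0 then none else some (pvKill mM x em 1)) →
      (∀ p ∈ d.items, pvKill mM p.1 em 1 ≠ 0) →
      l.foldl (fun covered mutant =>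
        let covered := covered.insert mutant 0
        let covered := pvInnerA mM mutant covered em 1
        if covered.getD mutant 0 == 0 then covered.erase mutant else covered) d =
      l.foldl (fun d m =>
        match first.get? m with
        | some k => d.insert m k
        | none => d) d := by
  intro l
  induction l with
  | nil => intro d _ _; rfl
  | cons x rest ih =>
    intro d hml hd
    have hx := hml x (List.mem_cons_self)
    have hrest : ∀ y ∈ rest, first.get? y =
        if pvKill mM y em 1 = 0 then none else some (pvKill mM y em 1) :=
      fun y hy => hml y (List.mem_cons_of_mem _ hy)
    simp only [List.foldl_cons]
    rw [pvInnerA_eq mM x em 1 (d.insert x 0) one_pos]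
    by_cases hk : pvKill mM x em 1 = 0
    · rw [if_pos hk] at hx ⊢
      rw [hx]
      have hz : ((d.insert x 0).getD x 0 == 0) = true := by
        simp [PySem.Dict.getD_insert_self]
      rw [if_pos hz, erase_insert_self,
        erase_of_forall_ne (fun p hp hcon => hd p hp (hcon ▸ hk))]
      exact ih d hrest hd
    · rw [if_neg hk] at hx ⊢
      rw [hx, PySem.Dict.insert_insert_self]
      rw [if_neg (by simp [PySem.Dict.getD_insert_self]; exact hk)]
      apply ih _ hrest
      intro p hp
      rcases (PySem.Dict.mem_items_insert _ _ _ _).1 hp with hpx | ⟨hpd, _⟩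
      · rw [hpx]; exact hk
      · exact hd p hpd

-- ===== VERDICT (by name: the statement is the Claim_ definition above) =====
theorem evaluateMutants_spec : Claim_equal_evaluateMutants := by
  intro mM ml em _ _
  unfold Spec_evaluateMutants evaluateMutants evaluateMutants_alt
  rw [main_fold mM em (pvScanB mM em 1 PySem.Dict.empty (PySem.List.dedup ml)) ml
    PySem.Dict.empty ?_ ?_]
  · intro x hx
    rw [pvScanB_get? mM x em 1 PySem.Dict.empty (PySem.List.dedup ml) one_pos]
    by_cases hk : pvKill mM x em 1 = 0
    · simp [hx, hk, PySem.Dict.get?_empty]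
    · simp [hx, hk]
  · intro p hp
    simp [PySem.Dict.empty] at hp
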